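-- pv_equiv track=rewrite | github.com/HitzCommitted/python_dojo | ex7.py | employee_hour_check
-- ===== SOURCE A (Python) =====
-- def employee_hour_check(work_hours):
--     highest_hours = 0
--     highest_employee = ""
--
--     for emp, hours in work_hours:
--         if hours > highest_hours:
--             highest_hours = hours
--             highest_employee = emp
--         else:
--             pass
--
--     return (highest_employee, highest_hours)
-- ===== SOURCE B (Python) =====
-- def employee_hour_check(work_hours):
--     # Sort descending by hours; Python's sort is stable, so the first
--     # employee with the maximal hours stays first (A's strict-'>' rule).
--     s = sorted(work_hours, key=lambda x: x[1], reverse=True)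
--     if s and s[0][1] > 0:
--         return s[0]
--     return ("", 0)
-- ===== Notes on version B (the rewrite author's own statement) =====
-- stated objective: alternative
-- what changed: Replaces the running-maximum accumulator loop with a stable descending sort by hours followed by picking the head (guarded by the > 0 seed rule), a sort-then-select strategy instead of a single-pass scan.
import Mathlib
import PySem

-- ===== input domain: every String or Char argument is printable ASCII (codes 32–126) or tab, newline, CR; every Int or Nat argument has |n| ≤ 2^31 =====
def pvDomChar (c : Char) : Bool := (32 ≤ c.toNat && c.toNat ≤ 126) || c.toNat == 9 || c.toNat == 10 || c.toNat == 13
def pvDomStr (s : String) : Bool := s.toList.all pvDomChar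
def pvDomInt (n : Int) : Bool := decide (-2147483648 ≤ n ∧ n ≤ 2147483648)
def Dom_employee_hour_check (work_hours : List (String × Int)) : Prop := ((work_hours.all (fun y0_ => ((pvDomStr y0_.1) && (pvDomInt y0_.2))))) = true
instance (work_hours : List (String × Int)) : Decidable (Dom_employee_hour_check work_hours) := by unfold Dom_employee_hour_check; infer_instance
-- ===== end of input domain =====

-- B replaces A's running-maximum scan with a stable descending sort by hours followed
-- by picking the head (with A's > 0 seed rule); objective: alternative algorithm.

-- ===== PORT A =====
-- A: running maximum with seed ("", 0), updated only on strictly greater hours.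
def employee_hour_check (work_hours : List (String × Int)) : String × Int :=
  work_hours.foldl
    (fun (st : String × Int) eh =>
      if eh.2 > st.2 then (eh.1, eh.2) else st)
    ("", 0)

-- ===== PORT B =====
-- B: s = sorted(work_hours, key=lambda x: x[1], reverse=True);
--    if s and s[0][1] > 0: return s[0]; return ("", 0)
def employee_hour_check_alt (work_hours : List (String × Int)) : String × Int :=
  let s := PySem.List.sorted work_hours (fun x : String × Int => x.2) true
  match s with
  | [] => ("", 0)
  | m :: _ => if m.2 > 0 then m else ("", 0)

-- ===== PRECONDITION & SPEC =====
def Spec_employee_hour_check (work_hours : List (String × Int)) (out : String × Int) : Prop := out = employee_hour_check_alt work_hours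
instance (work_hours : List (String × Int)) (out : String × Int) : Decidable (Spec_employee_hour_check work_hours out) := by unfold Spec_employee_hour_check; infer_instance

-- ===== CLAIM (what is proved, stated in full; the proofs are below) =====
def Claim_equal_employee_hour_check : Prop := ∀ (work_hours : List (String × Int)), Dom_employee_hour_check work_hours → Spec_employee_hour_check work_hours (employee_hour_check work_hours)

-- ===== LEMMAS AND PROOFS =====

-- The head of the insertion-sort fold (with a nonempty accumulator) is the
-- running strict maximum of the inserted elements, seeded with the old head.
theorem pv_head_foldl_insertBy (before : (String × Int) → (String × Int) → Bool)
    (xs : List (String × Int)) (h : String × Int) (r : List (String × Int)) :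
    (xs.foldl (fun acc x => PySem.List.insertBy before x acc) (h :: r)).head?
      = some (xs.foldl (fun s x => if before x s then x else s) h) := by
  induction xs generalizing h r with
  | nil => rfl
  | cons x xs ih =>
      simp only [List.foldl_cons, PySem.List.insertBy]
      by_cases hb : before x h
      · simp [hb, ih]
      · simp [hb, ih]

-- Folding A's step from the seeded head equals folding from the raw head and
-- applying the ("", 0) seed rule afterwards.
theorem pv_seed_fold (t : List (String × Int)) (a : String × Int) :
    t.foldl (fun (st : String × Int) eh => if eh.2 > st.2 then (eh.1, eh.2) else st)
        (if a.2 > 0 then a else ("", 0))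
      = (let g := t.foldl (fun (st : String × Int) eh => if eh.2 > st.2 then (eh.1, eh.2) else st) a;
         if g.2 > 0 then g else ("", 0)) := by
  induction t generalizing a with
  | nil => rfl
  | cons e t ih =>
      simp only [List.foldl_cons]
      by_cases ha : a.2 > 0
      · by_cases he : e.2 > a.2
        · have := ih (e.1, e.2)
          simpa [ha, he, show e.2 > 0 by omega] using this
        · have := ih a
          simpa [ha, he, show ¬ e.2 > a.2 from he] using this
      · by_cases he : e.2 > 0
        · have := ih (e.1, e.2)
          simpa [ha, he, show e.2 > a.2 by omega, show e.2 > (0 : Int) from he] using this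
        · by_cases he' : e.2 > a.2
          · have := ih (e.1, e.2)
            simpa [ha, he, he'] using this
          · have := ih a
            simpa [ha, he, he'] using this

-- ===== VERDICT (by name: the statement is the Claim_ definition above) =====
theorem employee_hour_check_spec : Claim_equal_employee_hour_check := by
  intro wh _
  unfold Spec_employee_hour_check employee_hour_check employee_hour_check_alt
  cases wh with
  | nil => rfl
  | cons x t =>
      rw [PySem.List.sorted_rev_eq_foldl_insertBy]
      simp only [List.foldl_cons, PySem.List.insertBy]
      have hh := pv_head_foldl_insertBy
        (fun a b : String × Int => decide (b.2 < a.2)) t x []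
      set L := t.foldl
        (fun acc y => PySem.List.insertBy (fun a b : String × Int => decide (b.2 < a.2)) y acc)
        [x] with hL
      have hstep : (t.foldl (fun (s : String × Int) y => if decide (s.2 < y.2) then y else s) x)
          = t.foldl (fun (st : String × Int) eh => if eh.2 > st.2 then (eh.1, eh.2) else st) x := by
        have hfun : (fun (s : String × Int) y => if decide (s.2 < y.2) then y else s)
            = (fun (st : String × Int) eh => if eh.2 > st.2 then (eh.1, eh.2) else st) := by
          funext s y
          by_cases h : s.2 < y.2 <;> simp [h, gt_iff_lt]
        rw [hfun]
      cases hLc : L with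
      | nil => rw [hLc] at hh; simp at hh
      | cons m r =>
          rw [hLc] at hh
          simp only [List.head?_cons, Option.some.injEq] at hh
          have hx : (if x.2 > 0 then x else (("", 0) : String × Int))
              = (if x.2 > (0:Int) then (x.1, x.2) else ("", 0)) := by
            by_cases h : x.2 > 0 <;> simp [h]
          have := pv_seed_fold t x
          rw [hx] at this
          simp only [] at this ⊢
          rw [show (if x.2 > (0:Int) then (x.1, x.2) else (("",0) : String × Int))
              = (if x.2 > (("",0) : String × Int).2 then (x.1, x.2) else ("",0)) from rfl] at this
          rw [this, hh, hstep]
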